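-- pv_equiv track=rewrite | github.com/ramgeart/uithub-local | src/uithub_local/utils.py | _strip_sql_line_comment
-- ===== SOURCE A (Python) =====
-- def _strip_sql_line_comment(line: str) -> str:
--     """Strip a SQL -- line comment from a single line, preserving string literals."""
--     in_single = False
--     in_double = False
--     i = 0
--     length = len(line)
--     while i < length:
--         ch = line[i]
--         # Handle single-quoted strings and doubled-quote escapes (e.g. 'it''s')
--         if ch == "'" and not in_double:
--             if in_single and i + 1 < length and line[i + 1] == "'":
--                 # Escaped single quote inside a single-quoted string
--                 i += 2
--                 continue
--             in_single = not in_single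
--             i += 1
--             continue
--         # Handle double-quoted identifiers/strings
--         # and doubled-quote escapes (e.g. "a""b")
--         if ch == '"' and not in_single:
--             if in_double and i + 1 < length and line[i + 1] == '"':
--                 # Escaped double quote inside a double-quoted string
--                 i += 2
--                 continue
--             in_double = not in_double
--             i += 1
--             continue
--         # Detect start of a line comment when not inside any string literal
--         if not in_single and not in_double and ch == "-" and i + 1 < length:
--             if line[i + 1] == "-":
--                 return line[:i].rstrip()
--         i += 1
--     return line
-- ===== SOURCE B (Python) =====
-- def _strip_sql_line_comment(line: str) -> str:
--     """Strip a SQL -- line comment, preserving string literals (token-driven scanner)."""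
--
--     def consume_literal(rest: str, quote: str):
--         # rest = text after an opening quote; return the text after the closing
--         # quote, or None when the literal is unterminated.
--         while rest:
--             c, tail = rest[0], rest[1:]
--             if c != quote:
--                 rest = tail
--             elif tail[:1] == quote:  # doubled quote escape
--                 rest = tail[1:]
--             else:
--                 return tail
--         return None
--
--     rest = line
--     while rest:
--         if rest.startswith("--"):
--             return line[:len(line) - len(rest)].rstrip()
--         if rest[0] in "'\"":
--             nxt = consume_literal(rest[1:], rest[0])
--             if nxt is None:
--                 return line  # unterminated literal swallows the rest of the line
--             rest = nxt
--         else: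
--             rest = rest[1:]
--     return line
-- ===== Notes on version B (the rewrite author's own statement) =====
-- stated objective: alternative
-- what changed: Replaced A's index-based while loop carrying in_single/in_double boolean state by a token-driven scanner over the remaining suffix that delegates each whole quoted literal (with doubled-quote escapes) to a separate consume_literal helper, so no quoting state is ever carried.
import Mathlib
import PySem

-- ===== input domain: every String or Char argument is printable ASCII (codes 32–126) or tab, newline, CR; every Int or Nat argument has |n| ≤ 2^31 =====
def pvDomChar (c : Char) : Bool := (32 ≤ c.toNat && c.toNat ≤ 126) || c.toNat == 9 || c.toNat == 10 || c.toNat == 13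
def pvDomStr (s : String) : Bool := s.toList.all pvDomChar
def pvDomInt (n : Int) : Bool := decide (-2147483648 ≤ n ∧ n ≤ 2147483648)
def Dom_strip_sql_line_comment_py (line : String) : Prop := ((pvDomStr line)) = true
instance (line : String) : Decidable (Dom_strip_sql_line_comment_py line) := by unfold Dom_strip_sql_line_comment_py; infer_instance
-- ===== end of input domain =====

-- B replaces A's index-and-boolean state machine by a token-driven scanner (suffix recursion with a
-- separate string-literal consumer); objective: simpler/alternative, same O(n) cost.

-- ===== PORT A =====
-- A's while loop over index i with in_single/in_double state, transliterated step for step.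
def pvLoopA (cs : List Char) (insg indb : Bool) (i : Nat) : List Char :=
  if _h : i < cs.length then
    if cs.getD i ' ' = '\'' ∧ indb = false then
      if insg = true ∧ i + 1 < cs.length ∧ cs.getD (i+1) ' ' = '\'' then
        pvLoopA cs insg indb (i+2)
      else pvLoopA cs (!insg) indb (i+1)
    else if cs.getD i ' ' = '"' ∧ insg = false then
      if indb = true ∧ i + 1 < cs.length ∧ cs.getD (i+1) ' ' = '"' then
        pvLoopA cs insg indb (i+2)
      else pvLoopA cs insg (!indb) (i+1)
    else if insg = false ∧ indb = false ∧ cs.getD i ' ' = '-' ∧ i + 1 < cs.length then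
      if cs.getD (i+1) ' ' = '-' then PySem.Chars.rstrip (cs.take i)
      else pvLoopA cs insg indb (i+1)
    else pvLoopA cs insg indb (i+1)
  else cs
termination_by cs.length - i
decreasing_by all_goals exact Nat.sub_lt_sub_left _h (Nat.lt_add_of_pos_right (by decide))

def strip_sql_line_comment_py (line : String) : String :=
  String.ofList (pvLoopA line.toList false false 0)

-- ===== PORT B =====
-- B's consume_literal: text after the opening quote in, text after the closing quote out (none = unterminated).
def pvConsumeLit (q : Char) : List Char → Option (List Char)
  | [] => none
  | c :: tail =>
    if c ≠ q then pvConsumeLit q tail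
    else
      match tail with
      | [] => some []
      | t0 :: t' => if t0 = q then pvConsumeLit q t' else some (t0 :: t')

theorem pvConsumeLit_length (q : Char) (r nxt : List Char) (h : pvConsumeLit q r = some nxt) :
    nxt.length < r.length := by
  cases r with
  | nil => simp [pvConsumeLit] at h
  | cons c tail =>
    rw [pvConsumeLit.eq_def] at h
    by_cases hc : c = q
    · cases tail with
      | nil => simp [hc] at h; simp_all
      | cons t0 t' =>
        by_cases ht : t0 = q
        · simp [hc, ht] at h
          have := pvConsumeLit_length q t' nxt h
          simp only [List.length_cons]; omega
        · simp [hc, ht] at h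
          rw [← h]; simp only [List.length_cons]; omega
    · simp [hc] at h
      have := pvConsumeLit_length q tail nxt h
      simp only [List.length_cons]; omega
termination_by r.length

-- B's main loop: scan the remaining suffix `rest`, jumping over whole string literals.
def pvScanB (cs : List Char) (rest : List Char) : List Char :=
  match hr : rest with
  | [] => cs
  | c :: tail =>
    if PySem.Chars.startswith (c :: tail) ['-', '-'] then
      PySem.Chars.rstrip (cs.take (cs.length - (c :: tail).length))
    else if c = '\'' ∨ c = '"' then
      match hm : pvConsumeLit c tail with
      | none => cs
      | some nxt => pvScanB cs nxt
    else pvScanB cs tail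
termination_by rest.length
decreasing_by
  · simpa using Nat.lt_succ_of_lt (pvConsumeLit_length _ _ _ hm)
  · simpa using Nat.lt_succ_self tail.length

def strip_sql_line_comment_py_alt (line : String) : String :=
  String.ofList (pvScanB line.toList line.toList)

-- ===== PRECONDITION & SPEC =====
def Spec_strip_sql_line_comment_py (line : String) (out : String) : Prop := out = strip_sql_line_comment_py_alt line
instance (line : String) (out : String) : Decidable (Spec_strip_sql_line_comment_py line out) := by unfold Spec_strip_sql_line_comment_py; infer_instance

-- ===== CLAIM (what is proved, stated in full; the proofs are below) =====
def Claim_equal_strip_sql_line_comment_py : Prop := ∀ (line : String), Dom_strip_sql_line_comment_py line → Spec_strip_sql_line_comment_py line (strip_sql_line_comment_py line)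

-- ===== LEMMAS AND PROOFS =====

theorem pv_drop_cons (cs : List Char) (i : Nat) (h : i < cs.length) :
    cs.drop i = cs[i] :: cs.drop (i+1) := List.drop_eq_getElem_cons h

theorem pv_getD (cs : List Char) (i : Nat) (h : i < cs.length) : cs.getD i ' ' = cs[i] := by
  simp [List.getD_eq_getElem?_getD, List.getElem?_eq_getElem h]

-- While A is inside a single-quoted literal at position i, B's consume_literal on the same
-- suffix agrees: either both run off the end of the line, or both land just past the literal.
theorem pv_litS (cs : List Char) (i : Nat) (h : i ≤ cs.length) :
    (pvConsumeLit '\'' (cs.drop i) = none ∧ pvLoopA cs true false i = cs) ∨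
    (∃ j, i < j ∧ j ≤ cs.length ∧ pvConsumeLit '\'' (cs.drop i) = some (cs.drop j) ∧
      pvLoopA cs true false i = pvLoopA cs false false j) := by
  by_cases hi : i < cs.length
  · have hd := pv_drop_cons cs i hi
    have hg := pv_getD cs i hi
    by_cases hq : cs[i] = '\''
    · by_cases hn1 : i + 1 < cs.length
      · have hd2 := pv_drop_cons cs (i+1) hn1
        have hg2 := pv_getD cs (i+1) hn1
        by_cases hq2 : cs[i+1] = '\''
        · have hA : pvLoopA cs true false i = pvLoopA cs true false (i+2) := by
            rw [pvLoopA]; simp [hi, hg, hq, hn1, List.getElem?_eq_getElem hn1, hq2]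
          have hC : pvConsumeLit '\'' (cs.drop i) = pvConsumeLit '\'' (cs.drop (i+2)) := by
            rw [hd, hd2, pvConsumeLit.eq_def]; simp [hq, hq2, -List.getElem_cons_drop]
          rcases pv_litS cs (i+2) (by omega) with ⟨hn, he⟩ | ⟨j, hj1, hj2, hc, he⟩
          · exact Or.inl ⟨by rw [hC]; exact hn, by rw [hA]; exact he⟩
          · exact Or.inr ⟨j, by omega, hj2, by rw [hC]; exact hc, by rw [hA]; exact he⟩
        · refine Or.inr ⟨i+1, by omega, by omega, ?_, ?_⟩
          · rw [hd, hd2, pvConsumeLit.eq_def]; simp [hq, hq2, -List.getElem_cons_drop]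
          · rw [pvLoopA]; simp [hi, hg, hq, List.getElem?_eq_getElem hn1, hq2]
      · have hnil : cs.drop (i+1) = [] := List.drop_eq_nil_of_le (by omega)
        refine Or.inr ⟨i+1, by omega, by omega, ?_, ?_⟩
        · rw [hd, hnil, pvConsumeLit.eq_def]; simp [hq, -List.getElem_cons_drop]
        · rw [pvLoopA]; simp [hi, hg, hq, hn1]
    · have hA : pvLoopA cs true false i = pvLoopA cs true false (i+1) := by
        rw [pvLoopA]; simp [hi, hg, hq]
      have hC : pvConsumeLit '\'' (cs.drop i) = pvConsumeLit '\'' (cs.drop (i+1)) := by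
        rw [hd, pvConsumeLit.eq_def]; simp [hq, -List.getElem_cons_drop]
      rcases pv_litS cs (i+1) (by omega) with ⟨hn, he⟩ | ⟨j, hj1, hj2, hc, he⟩
      · exact Or.inl ⟨by rw [hC]; exact hn, by rw [hA]; exact he⟩
      · exact Or.inr ⟨j, by omega, hj2, by rw [hC]; exact hc, by rw [hA]; exact he⟩
  · have hnil : cs.drop i = [] := List.drop_eq_nil_of_le (by omega)
    refine Or.inl ⟨by rw [hnil]; rfl, by rw [pvLoopA]; simp [hi]⟩
termination_by cs.length - i

-- The same statement for a double-quoted literal.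
theorem pv_litD (cs : List Char) (i : Nat) (h : i ≤ cs.length) :
    (pvConsumeLit '"' (cs.drop i) = none ∧ pvLoopA cs false true i = cs) ∨
    (∃ j, i < j ∧ j ≤ cs.length ∧ pvConsumeLit '"' (cs.drop i) = some (cs.drop j) ∧
      pvLoopA cs false true i = pvLoopA cs false false j) := by
  by_cases hi : i < cs.length
  · have hd := pv_drop_cons cs i hi
    have hg := pv_getD cs i hi
    by_cases hq : cs[i] = '"'
    · by_cases hn1 : i + 1 < cs.length
      · have hd2 := pv_drop_cons cs (i+1) hn1
        have hg2 := pv_getD cs (i+1) hn1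
        by_cases hq2 : cs[i+1] = '"'
        · have hA : pvLoopA cs false true i = pvLoopA cs false true (i+2) := by
            rw [pvLoopA]; simp [hi, hg, hq, hn1, List.getElem?_eq_getElem hn1, hq2]
          have hC : pvConsumeLit '"' (cs.drop i) = pvConsumeLit '"' (cs.drop (i+2)) := by
            rw [hd, hd2, pvConsumeLit.eq_def]; simp [hq, hq2, -List.getElem_cons_drop]
          rcases pv_litD cs (i+2) (by omega) with ⟨hn, he⟩ | ⟨j, hj1, hj2, hc, he⟩
          · exact Or.inl ⟨by rw [hC]; exact hn, by rw [hA]; exact he⟩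
          · exact Or.inr ⟨j, by omega, hj2, by rw [hC]; exact hc, by rw [hA]; exact he⟩
        · refine Or.inr ⟨i+1, by omega, by omega, ?_, ?_⟩
          · rw [hd, hd2, pvConsumeLit.eq_def]; simp [hq, hq2, -List.getElem_cons_drop]
          · rw [pvLoopA]; simp [hi, hg, hq, List.getElem?_eq_getElem hn1, hq2]
      · have hnil : cs.drop (i+1) = [] := List.drop_eq_nil_of_le (by omega)
        refine Or.inr ⟨i+1, by omega, by omega, ?_, ?_⟩
        · rw [hd, hnil, pvConsumeLit.eq_def]; simp [hq, -List.getElem_cons_drop]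
        · rw [pvLoopA]; simp [hi, hg, hq, hn1]
    · have hA : pvLoopA cs false true i = pvLoopA cs false true (i+1) := by
        rw [pvLoopA]; simp [hi, hg, hq]
      have hC : pvConsumeLit '"' (cs.drop i) = pvConsumeLit '"' (cs.drop (i+1)) := by
        rw [hd, pvConsumeLit.eq_def]; simp [hq, -List.getElem_cons_drop]
      rcases pv_litD cs (i+1) (by omega) with ⟨hn, he⟩ | ⟨j, hj1, hj2, hc, he⟩
      · exact Or.inl ⟨by rw [hC]; exact hn, by rw [hA]; exact he⟩
      · exact Or.inr ⟨j, by omega, hj2, by rw [hC]; exact hc, by rw [hA]; exact he⟩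
  · have hnil : cs.drop i = [] := List.drop_eq_nil_of_le (by omega)
    refine Or.inl ⟨by rw [hnil]; rfl, by rw [pvLoopA]; simp [hi]⟩
termination_by cs.length - i

-- Outside any literal the two scanners agree from every position i.
theorem pv_main (cs : List Char) (i : Nat) (h : i ≤ cs.length) :
    pvLoopA cs false false i = pvScanB cs (cs.drop i) := by
  by_cases hi : i < cs.length
  · have hd := pv_drop_cons cs i hi
    have hg := pv_getD cs i hi
    rw [hd]
    by_cases hq : cs[i] = '\''
    · rw [hq]
      have hsw : PySem.Chars.startswith ('\'' :: cs.drop (i+1)) ['-','-'] = false := by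
        simp [PySem.Chars.startswith, List.isPrefixOf, -List.getElem_cons_drop]
      have hA : pvLoopA cs false false i = pvLoopA cs true false (i+1) := by
        rw [pvLoopA]; simp [hi, hg, hq]
      rcases pv_litS cs (i+1) (by omega) with ⟨hn, he⟩ | ⟨j, hj1, hj2, hc, he⟩
      · rw [hA, he, pvScanB]
        simp only [hsw, Bool.false_eq_true, if_false]
        simp only [true_or, or_true, if_true]
        split <;> simp_all
      · rw [hA, he, pvScanB]
        simp only [hsw, Bool.false_eq_true, if_false]
        simp only [true_or, or_true, if_true]
        split
        · simp_all
        · rename_i nxt heq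
          rw [hc] at heq
          injection heq with heq
          rw [← heq]
          exact pv_main cs j hj2
    · by_cases hq2 : cs[i] = '"'
      · rw [hq2]
        have hsw : PySem.Chars.startswith ('"' :: cs.drop (i+1)) ['-','-'] = false := by
          simp [PySem.Chars.startswith, List.isPrefixOf, -List.getElem_cons_drop]
        have hA : pvLoopA cs false false i = pvLoopA cs false true (i+1) := by
          rw [pvLoopA]; simp [hi, hg, hq, hq2]
        rcases pv_litD cs (i+1) (by omega) with ⟨hn, he⟩ | ⟨j, hj1, hj2, hc, he⟩
        · rw [hA, he, pvScanB]
          simp only [hsw, Bool.false_eq_true, if_false]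
          simp only [true_or, or_true, if_true]
          split <;> simp_all
        · rw [hA, he, pvScanB]
          simp only [hsw, Bool.false_eq_true, if_false]
          simp only [true_or, or_true, if_true]
          split
          · simp_all
          · rename_i nxt heq
            rw [hc] at heq
            injection heq with heq
            rw [← heq]
            exact pv_main cs j hj2
      · have hBadv : PySem.Chars.startswith (cs[i] :: cs.drop (i+1)) ['-','-'] = false →
            pvScanB cs (cs[i] :: cs.drop (i+1)) = pvScanB cs (cs.drop (i+1)) := by
          intro hsw
          rw [pvScanB]
          simp only [hsw, Bool.false_eq_true, if_false]
          rw [if_neg (by simp [hq, hq2])]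
        by_cases hm1 : cs[i] = '-'
        · by_cases hm2 : i + 1 < cs.length
          · have hd2 := pv_drop_cons cs (i+1) hm2
            by_cases hm3 : cs[i+1] = '-'
            · have hsw : PySem.Chars.startswith (cs[i] :: cs.drop (i+1)) ['-','-'] = true := by
                rw [hd2]
                simp [PySem.Chars.startswith, List.isPrefixOf, hm1, hm3, eq_comm, -List.getElem_cons_drop]
              have hA : pvLoopA cs false false i = PySem.Chars.rstrip (cs.take i) := by
                rw [pvLoopA]; simp [hi, hg, hq, hq2, hm1, hm2, List.getElem?_eq_getElem hm2, hm3]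
              have hlen : (cs[i] :: cs.drop (i+1)).length = cs.length - i := by
                simp [-List.getElem_cons_drop]; omega
              have hB : pvScanB cs (cs[i] :: cs.drop (i+1)) = PySem.Chars.rstrip (cs.take i) := by
                rw [pvScanB]
                simp only [hsw, if_true]
                rw [hlen, show cs.length - (cs.length - i) = i by omega]
              rw [hA, hB]
            · have hsw : PySem.Chars.startswith (cs[i] :: cs.drop (i+1)) ['-','-'] = false := by
                rw [hd2]
                simp [PySem.Chars.startswith, List.isPrefixOf, hm3, Ne.symm hm3, -List.getElem_cons_drop]
              have hA : pvLoopA cs false false i = pvLoopA cs false false (i+1) := by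
                rw [pvLoopA]; simp [hi, hg, hq, hq2, hm1, hm2, List.getElem?_eq_getElem hm2, hm3]
              rw [hA, hBadv hsw]
              exact pv_main cs (i+1) (by omega)
          · have hnil2 : cs.drop (i+1) = [] := List.drop_eq_nil_of_le (by omega)
            have hsw : PySem.Chars.startswith (cs[i] :: cs.drop (i+1)) ['-','-'] = false := by
              rw [hnil2]
              simp [PySem.Chars.startswith, List.isPrefixOf, -List.getElem_cons_drop]
            have hA : pvLoopA cs false false i = pvLoopA cs false false (i+1) := by
              rw [pvLoopA]; simp [hi, hg, hq, hq2, hm1, hm2]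
            rw [hA, hBadv hsw]
            exact pv_main cs (i+1) (by omega)
        · have hsw : PySem.Chars.startswith (cs[i] :: cs.drop (i+1)) ['-','-'] = false := by
            simp [PySem.Chars.startswith, List.isPrefixOf, hm1, Ne.symm hm1, -List.getElem_cons_drop]
          have hA : pvLoopA cs false false i = pvLoopA cs false false (i+1) := by
            rw [pvLoopA]; simp [hi, hg, hq, hq2, hm1]
          rw [hA, hBadv hsw]
          exact pv_main cs (i+1) (by omega)
  · have hnil : cs.drop i = [] := List.drop_eq_nil_of_le (by omega)
    rw [hnil, pvScanB, pvLoopA]; simp [hi]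
termination_by cs.length - i

-- ===== VERDICT (by name: the statement is the Claim_ definition above) =====
theorem strip_sql_line_comment_py_spec : Claim_equal_strip_sql_line_comment_py := by
  intro line _
  unfold Spec_strip_sql_line_comment_py strip_sql_line_comment_py strip_sql_line_comment_py_alt
  have := pv_main line.toList 0 (by omega)
  simpa using congrArg String.ofList this
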